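-- pv_equiv track=rewrite | github.com/ibanezm64/EJERCICIO12 | Ejercicio12.py | ordena_positivos
-- ===== SOURCE A (Python) =====
-- def ordena_positivos(list_num):
--     list_result = []
--     list_neg_index = []
--     index = 0
--     for num in list_num :
--         if num < 0 :
--             list_neg_index.append(index)
--         else :
--             list_result.append(num)
--         index += 1
--     list_result.sort()
--     for ind in list_neg_index:
--         list_result.insert(index, list_num[ind])
--     return list_result
-- ===== SOURCE B (Python) =====
-- def ordena_positivos(list_num):
--     return sorted(list_num, key=lambda v: (0, v) if v >= 0 else (1, 0))
-- ===== Notes on version B (the rewrite author's own statement) =====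
-- stated objective: idiomatic
-- what changed: A's partition loop + in-place sort + index-driven insert loop is replaced by one stable sorted() call with a tuple key that ranks non-negatives by value before all negatives (kept in original order by stability); B also does not mutate its argument.
import Mathlib
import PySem

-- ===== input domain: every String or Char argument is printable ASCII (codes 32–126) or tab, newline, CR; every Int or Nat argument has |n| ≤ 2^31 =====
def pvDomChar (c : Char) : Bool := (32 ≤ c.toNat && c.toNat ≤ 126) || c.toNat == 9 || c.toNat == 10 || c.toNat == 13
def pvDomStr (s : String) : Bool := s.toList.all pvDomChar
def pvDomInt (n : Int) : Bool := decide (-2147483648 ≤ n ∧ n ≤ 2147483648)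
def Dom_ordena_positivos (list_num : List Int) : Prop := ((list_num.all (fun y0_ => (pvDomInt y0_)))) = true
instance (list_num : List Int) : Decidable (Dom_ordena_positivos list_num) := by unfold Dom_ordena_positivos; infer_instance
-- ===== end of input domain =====

-- B replaces A's partition loop + sort + insert loop by a single stable keyed sort (idiomatic; same cost; B does not mutate its argument, the equivalence is about the return value).

-- ===== PORT A =====
-- state of A's first loop: (list_result, list_neg_index, index)
def ordena_positivos (list_num : List Int) : List Int :=
  let st := list_num.foldl
    (fun (st : List Int × List Int × Int) num =>
      if num < 0 then (st.1, st.2.1 ++ [st.2.2], st.2.2 + 1)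
      else (st.1 ++ [num], st.2.1, st.2.2 + 1))
    ([], [], 0)
  let list_result := PySem.List.sorted st.1 (fun x => x)
  -- list_num[ind]: ind is always a valid non-negative index here, so pyGetD with a dummy default is exact
  st.2.1.foldl (fun acc ind => PySem.List.insert acc st.2.2 (PySem.List.pyGetD list_num ind 0)) list_result

-- ===== PORT B =====
-- sorted(list_num, key=lambda v: (0, v) if v >= 0 else (1, 0))
def ordena_positivos_alt (list_num : List Int) : List Int :=
  PySem.List.sorted2 list_num (fun v => if v ≥ 0 then (0 : Int) else 1)
    (fun v => if v ≥ 0 then v else 0)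

-- ===== PRECONDITION & SPEC =====
def Spec_ordena_positivos (list_num : List Int) (out : List Int) : Prop := out = ordena_positivos_alt list_num
instance (list_num : List Int) (out : List Int) : Decidable (Spec_ordena_positivos list_num out) := by unfold Spec_ordena_positivos; infer_instance

-- ===== CLAIM (what is proved, stated in full; the proofs are below) =====
def Claim_equal_ordena_positivos : Prop := ∀ (list_num : List Int), Dom_ordena_positivos list_num → Spec_ordena_positivos list_num (ordena_positivos list_num)

-- ===== LEMMAS AND PROOFS =====

-- positions (as Python indices, starting at i) of the negative entries of a list
def pvNegIdx : List Int → Int → List Int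
  | [], _ => []
  | x :: t, i => if x < 0 then i :: pvNegIdx t (i + 1) else pvNegIdx t (i + 1)

-- A's first loop: partition into kept values, negative positions, and the running index
theorem pvFoldA (xs : List Int) (P NI : List Int) (i : Int) :
    xs.foldl
      (fun (st : List Int × List Int × Int) num =>
        if num < 0 then (st.1, st.2.1 ++ [st.2.2], st.2.2 + 1)
        else (st.1 ++ [num], st.2.1, st.2.2 + 1))
      (P, NI, i)
    = (P ++ xs.filter (fun n => !decide (n < 0)), NI ++ pvNegIdx xs i, i + xs.length) := by
  induction xs generalizing P NI i with
  | nil => simp [pvNegIdx]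
  | cons x t ih =>
    by_cases hx : x < 0 <;>
      simp [List.foldl_cons, hx, pvNegIdx, ih] <;> omega

-- reading list_num back at the recorded negative positions yields the negatives in order
theorem pvMapNeg (xs : List Int) (pre : List Int) :
    (pvNegIdx xs (pre.length)).map (fun ind => PySem.List.pyGetD (pre ++ xs) ind 0)
      = xs.filter (fun n => decide (n < 0)) := by
  induction xs generalizing pre with
  | nil => simp [pvNegIdx]
  | cons x t ih =>
    have hget : PySem.List.pyGetD (pre ++ x :: t) (pre.length) 0 = x := by
      rw [PySem.List.pyGetD_natCast]
      simp
    have hrec := ih (pre ++ [x])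
    simp only [List.length_append, List.length_cons, List.length_nil, Nat.cast_add,
      Nat.cast_one, List.append_assoc, List.cons_append, List.nil_append] at hrec
    push_cast at hrec
    by_cases hx : x < 0 <;>
      simp [pvNegIdx, hx, hget, hrec]

-- inserting at a position at or past the end appends
theorem pvInsert_ge (xs : List Int) (p v : Int) (h : (xs.length : Int) ≤ p) :
    PySem.List.insert xs p v = xs ++ [v] := by
  have hp : ¬ p < 0 := by omega
  simp [PySem.List.insert, PySem.List.sliceIndices, hp, min_eq_right h]

-- A's second loop: every insert lands at or past the end, so it is a map-append
theorem pvFoldInsert (L : Int) (f : Int → Int) (inds : List Int) (acc : List Int)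
    (h : (acc.length : Int) + inds.length ≤ L) :
    inds.foldl (fun a ind => PySem.List.insert a L (f ind)) acc = acc ++ inds.map f := by
  induction inds generalizing acc with
  | nil => simp
  | cons x t ih =>
    simp only [List.length_cons] at h
    have h1 : (acc.length : Int) ≤ L := by push_cast at h ⊢; omega
    rw [List.foldl_cons, pvInsert_ge acc L (f x) h1, ih]
    · simp
    · simp; push_cast at h ⊢; omega

theorem pvInsertBy_congr {α : Type} (b1 b2 : α → α → Bool) (x : α) (ys : List α)
    (h : ∀ y ∈ ys, b1 x y = b2 x y) :
    PySem.List.insertBy b1 x ys = PySem.List.insertBy b2 x ys := by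
  induction ys with
  | nil => rfl
  | cons y t ih =>
    have hy := h y (by simp)
    simp only [PySem.List.insertBy, hy]
    split
    · rfl
    · rw [ih (fun z hz => h z (by simp [hz]))]

theorem pvInsertBy_append_of_all_before {α : Type} (before : α → α → Bool) (x : α)
    (P N : List α) (h : ∀ y ∈ N, before x y = true) :
    PySem.List.insertBy before x (P ++ N) = PySem.List.insertBy before x P ++ N := by
  induction P with
  | nil =>
    cases N with
    | nil => rfl
    | cons y t => simp [PySem.List.insertBy, h y (by simp)]
  | cons p P' ih =>
    simp only [List.cons_append, PySem.List.insertBy]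
    split <;> simp [ih]

-- B's stable keyed sort IS "sorted non-negatives, then negatives in original order"
theorem pvBchar (xs : List Int) :
    ordena_positivos_alt xs
      = PySem.List.sorted (xs.filter (fun n => !decide (n < 0))) (fun x => x)
        ++ xs.filter (fun n => decide (n < 0)) := by
  induction xs using List.reverseRecOn with
  | nil => rfl
  | append_singleton t x ih =>
    have hB : ∀ (ys : List Int), ordena_positivos_alt ys
        = ys.foldl (fun acc z => PySem.List.insertBy
            (fun a b =>
              decide ((if a ≥ 0 then (0:Int) else 1) < (if b ≥ 0 then (0:Int) else 1)) ||
              (!decide ((if b ≥ 0 then (0:Int) else 1) < (if a ≥ 0 then (0:Int) else 1)) &&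
               decide ((if a ≥ 0 then a else 0) < (if b ≥ 0 then b else 0)))) z acc) [] := by
      intro ys; rfl
    rw [hB, List.foldl_append, ← hB, ih, List.foldl_cons, List.foldl_nil]
    by_cases hx : x < 0
    · have hnot : ∀ y ∈ PySem.List.sorted (t.filter (fun n => !decide (n < 0))) (fun x => x)
          ++ t.filter (fun n => decide (n < 0)),
          (decide ((if x ≥ 0 then (0:Int) else 1) < (if y ≥ 0 then (0:Int) else 1)) ||
            (!decide ((if y ≥ 0 then (0:Int) else 1) < (if x ≥ 0 then (0:Int) else 1)) &&
             decide ((if x ≥ 0 then x else 0) < (if y ≥ 0 then y else 0)))) = false := by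
        intro y _
        by_cases hy : y ≥ 0 <;> simp [hy, show ¬ x ≥ 0 by omega]
      rw [PySem.List.insertBy_of_forall_not_before _ _ _ hnot]
      simp [List.filter_append, hx]
    · have hN : ∀ y ∈ t.filter (fun n => decide (n < 0)),
          (decide ((if x ≥ 0 then (0:Int) else 1) < (if y ≥ 0 then (0:Int) else 1)) ||
            (!decide ((if y ≥ 0 then (0:Int) else 1) < (if x ≥ 0 then (0:Int) else 1)) &&
             decide ((if x ≥ 0 then x else 0) < (if y ≥ 0 then y else 0)))) = true := by
        intro y hy
        have hy' : y < 0 := by simpa using (List.of_mem_filter hy)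
        simp [show x ≥ 0 by omega, show ¬ y ≥ 0 by omega]
      rw [pvInsertBy_append_of_all_before _ _ _ _ hN]
      have hP : ∀ y ∈ PySem.List.sorted (t.filter (fun n => !decide (n < 0))) (fun x => x),
          (decide ((if x ≥ 0 then (0:Int) else 1) < (if y ≥ 0 then (0:Int) else 1)) ||
            (!decide ((if y ≥ 0 then (0:Int) else 1) < (if x ≥ 0 then (0:Int) else 1)) &&
             decide ((if x ≥ 0 then x else 0) < (if y ≥ 0 then y else 0)))) = decide (x < y) := by
        intro y hy
        have hy' : ¬ y < 0 := by
          have := (PySem.List.mem_sorted _ _ _ _).mp hy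
          simpa using List.of_mem_filter this
        simp [show x ≥ 0 by omega, show y ≥ 0 by omega]
      rw [pvInsertBy_congr _ (fun a b => decide (a < b)) _ _ hP]
      rw [PySem.List.sorted_eq_foldl_insertBy, PySem.List.sorted_eq_foldl_insertBy,
        List.filter_append, List.foldl_append]
      simp [hx]

-- ===== VERDICT (by name: the statement is the Claim_ definition above) =====
theorem ordena_positivos_spec : Claim_equal_ordena_positivos := by
  intro list_num _
  show ordena_positivos list_num = ordena_positivos_alt list_num
  unfold ordena_positivos
  rw [pvFoldA]
  simp only [List.nil_append]
  have hmap := pvMapNeg list_num []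
  simp only [List.length_nil, Nat.cast_zero, List.nil_append] at hmap
  have hlen : ((PySem.List.sorted (list_num.filter (fun n => !decide (n < 0))) (fun x => x)).length : Int)
      + (pvNegIdx list_num 0).length ≤ 0 + (list_num.length : Int) := by
    have h1 : (pvNegIdx list_num 0).length = (list_num.filter (fun n => decide (n < 0))).length := by
      rw [← hmap]; simp
    rw [PySem.List.length_sorted, h1]
    have := (List.length_eq_length_filter_add (fun n => !decide (n < 0)) (l := list_num)).symm
    simp only [Bool.not_not] at this
    omega
  rw [pvFoldInsert _ _ _ _ hlen, hmap, pvBchar]
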